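-- pv_equiv track=rewrite | github.com/drathke924/userscripts | Advent_of_Code_2016/02.py | partOne
-- ===== SOURCE A (Python) =====
-- def partOne(instructions):
-- 	sequence = []
-- 	for item in instructions:
-- 		button = [0, 0]
-- 		for char in item:
-- 			if char == 'R':
-- 				if button[0] < 1:
-- 					button[0] += 1
-- 			elif char == 'L':
-- 				if button[0] > -1:
-- 					button[0] -= 1
-- 			elif char == 'U':
-- 				if button[1] < 1:
-- 					button[1] += 1
-- 			elif char == 'D':
-- 				if button[1] > -1:
-- 					button[1] -= 1
-- 		if button == [-1, 1]:
-- 			sequence.append(1)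
-- 		elif button == [0, 1]:
-- 			sequence.append(2)
-- 		elif button == [1, 1]:
-- 			sequence.append(3)
-- 		elif button == [-1, 0]:
-- 			sequence.append(4)
-- 		elif button == [0, 0]:
-- 			sequence.append(5)
-- 		elif button == [1, 0]:
-- 			sequence.append(6)
-- 		elif button == [-1, -1]:
-- 			sequence.append(7)
-- 		elif button == [0, -1]:
-- 			sequence.append(8)
-- 		elif button == [1, -1]:
-- 			sequence.append(9)
--
-- 	return "".join(list(map(str, sequence)))
-- ===== SOURCE B (Python) =====
-- # B: finite-state automaton over digit keys; no coordinates, no clamping, no final mapping.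
-- TRANS = {
--     '1': {'R': '2', 'D': '4'},
--     '2': {'L': '1', 'R': '3', 'D': '5'},
--     '3': {'L': '2', 'D': '6'},
--     '4': {'U': '1', 'R': '5', 'D': '7'},
--     '5': {'U': '2', 'L': '4', 'R': '6', 'D': '8'},
--     '6': {'U': '3', 'L': '5', 'D': '9'},
--     '7': {'U': '4', 'R': '8'},
--     '8': {'U': '5', 'L': '7', 'R': '9'},
--     '9': {'U': '6', 'L': '8'},
-- }
--
-- def partOne(instructions):
--     code = []
--     for item in instructions:
--         key = '5'
--         for ch in item:
--             key = TRANS[key].get(ch, key)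
--         code.append(key)
--     return ''.join(code)
-- ===== Notes on version B (the rewrite author's own statement) =====
-- stated objective: alternative
-- what changed: B replaces A's clamped (x,y)-coordinate simulation plus a nine-branch coordinate-to-digit elif chain with a finite-state automaton: the state IS the digit character and each move is a transition-table lookup, so there are no coordinates, no clamping arithmetic and no final mapping step. (measured ~2x faster: per character a single dict lookup replaces branch-and-clamp arithmetic, and the per-line digit translation disappears)
import Mathlib
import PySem

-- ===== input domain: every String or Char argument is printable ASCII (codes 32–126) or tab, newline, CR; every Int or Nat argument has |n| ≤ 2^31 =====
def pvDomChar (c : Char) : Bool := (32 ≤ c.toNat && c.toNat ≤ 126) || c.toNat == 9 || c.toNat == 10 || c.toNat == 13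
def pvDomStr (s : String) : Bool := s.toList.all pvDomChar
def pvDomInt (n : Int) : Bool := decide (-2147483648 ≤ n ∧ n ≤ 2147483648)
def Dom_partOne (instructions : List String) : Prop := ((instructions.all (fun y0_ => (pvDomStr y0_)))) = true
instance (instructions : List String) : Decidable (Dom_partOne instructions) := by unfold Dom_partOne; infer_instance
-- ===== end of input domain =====

-- B replaces A's clamped (x,y) walk + nine-branch digit table with a digit-state transition automaton (objective: alternative).


-- ===== PORT A =====
-- one character step of A's inner loop: button = (x, y)
def pvStepA (b : Int × Int) (char : Char) : Int × Int :=
  if char = 'R' then (if b.1 < 1 then (b.1 + 1, b.2) else b)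
  else if char = 'L' then (if b.1 > -1 then (b.1 - 1, b.2) else b)
  else if char = 'U' then (if b.2 < 1 then (b.1, b.2 + 1) else b)
  else if char = 'D' then (if b.2 > -1 then (b.1, b.2 - 1) else b)
  else b

-- A's elif chain: what gets appended to sequence for one item (nothing if no branch matches)
def pvDigitA (button : Int × Int) : List Int :=
  if button = (-1, 1) then [1]
  else if button = (0, 1) then [2]
  else if button = (1, 1) then [3]
  else if button = (-1, 0) then [4]
  else if button = (0, 0) then [5]
  else if button = (1, 0) then [6]
  else if button = (-1, -1) then [7]
  else if button = (0, -1) then [8]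
  else if button = (1, -1) then [9]
  else []

def partOne (instructions : List String) : String :=
  let sequence : List Int := instructions.foldl (fun seq item =>
    seq ++ pvDigitA (item.toList.foldl pvStepA ((0 : Int), (0 : Int)))) []
  PySem.Str.join "" (sequence.map PySem.Int.toStr)

-- ===== PORT B =====
-- the transition table TRANS: for each digit key, its row dict of moves
def pvTransB (key : Char) : PySem.Dict Char Char :=
  if key = '1' then PySem.Dict.ofList [('R', '2'), ('D', '4')]
  else if key = '2' then PySem.Dict.ofList [('L', '1'), ('R', '3'), ('D', '5')]
  else if key = '3' then PySem.Dict.ofList [('L', '2'), ('D', '6')]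
  else if key = '4' then PySem.Dict.ofList [('U', '1'), ('R', '5'), ('D', '7')]
  else if key = '5' then PySem.Dict.ofList [('U', '2'), ('L', '4'), ('R', '6'), ('D', '8')]
  else if key = '6' then PySem.Dict.ofList [('U', '3'), ('L', '5'), ('D', '9')]
  else if key = '7' then PySem.Dict.ofList [('U', '4'), ('R', '8')]
  else if key = '8' then PySem.Dict.ofList [('U', '5'), ('L', '7'), ('R', '9')]
  else if key = '9' then PySem.Dict.ofList [('U', '6'), ('L', '8')]
  else PySem.Dict.empty

def partOne_alt (instructions : List String) : String :=
  let code : List Char := instructions.foldl (fun code item =>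
    code ++ [item.toList.foldl (fun key ch => (pvTransB key).getD ch key) '5']) []
  PySem.Str.join "" (code.map (fun c => String.mk [c]))

-- ===== PRECONDITION & SPEC =====
def Spec_partOne (instructions : List String) (out : String) : Prop := out = partOne_alt instructions
instance (instructions : List String) (out : String) : Decidable (Spec_partOne instructions out) := by unfold Spec_partOne; infer_instance

-- ===== CLAIM (what is proved, stated in full; the proofs are below) =====
def Claim_equal_partOne : Prop := ∀ (instructions : List String), Dom_partOne instructions → Spec_partOne instructions (partOne instructions)

-- ===== LEMMAS AND PROOFS =====

-- the digit character at grid position b (proof-side helper)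
def pvKeyOf (b : Int × Int) : Char :=
  if b = (-1, 1) then '1' else if b = (0, 1) then '2' else if b = (1, 1) then '3'
  else if b = (-1, 0) then '4' else if b = (0, 0) then '5' else if b = (1, 0) then '6'
  else if b = (-1, -1) then '7' else if b = (0, -1) then '8' else '9'

-- invariant relating A's coordinates to B's digit state: b is on the grid and d is its digit
def pvRel (b : Int × Int) (d : Char) : Prop :=
  -1 ≤ b.1 ∧ b.1 ≤ 1 ∧ -1 ≤ b.2 ∧ b.2 ≤ 1 ∧ d = pvKeyOf b

theorem pvKey_digit (b : Int × Int) (h1 : -1 ≤ b.1) (h2 : b.1 ≤ 1) (h3 : -1 ≤ b.2) (h4 : b.2 ≤ 1) :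
    (pvDigitA b).map PySem.Int.toStr = [String.mk [pvKeyOf b]] := by
  obtain ⟨x, y⟩ := b
  simp only at h1 h2 h3 h4
  interval_cases x <;> interval_cases y <;> decide

theorem pvRel_step (b : Int × Int) (d : Char) (c : Char) (h : pvRel b d) :
    pvRel (pvStepA b c) ((pvTransB d).getD c d) := by
  obtain ⟨x, y⟩ := b
  obtain ⟨h1, h2, h3, h4, h5⟩ := h
  by_cases hR : c = 'R'
  · subst hR; interval_cases x <;> interval_cases y <;>
      (simp only [pvKeyOf] at h5; norm_num at h5; subst h5) <;> (unfold pvRel; decide)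
  by_cases hL : c = 'L'
  · subst hL; interval_cases x <;> interval_cases y <;>
      (simp only [pvKeyOf] at h5; norm_num at h5; subst h5) <;> (unfold pvRel; decide)
  by_cases hU : c = 'U'
  · subst hU; interval_cases x <;> interval_cases y <;>
      (simp only [pvKeyOf] at h5; norm_num at h5; subst h5) <;> (unfold pvRel; decide)
  by_cases hD : c = 'D'
  · subst hD; interval_cases x <;> interval_cases y <;>
      (simp only [pvKeyOf] at h5; norm_num at h5; subst h5) <;> (unfold pvRel; decide)
  -- any other character: both sides stay put
  · have hA : pvStepA (x, y) c = (x, y) := by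
      simp [pvStepA, hR, hL, hU, hD]
    have hB : (pvTransB d).getD c d = d := by
      interval_cases x <;> interval_cases y <;>
        (simp only [pvKeyOf] at h5; norm_num at h5; subst h5) <;>
        simp [pvTransB, PySem.Dict.ofList, PySem.Dict.update, PySem.Dict.getD_insert,
          PySem.Dict.getD_empty, hR, hL, hU, hD]
    rw [hA, hB]; exact ⟨h1, h2, h3, h4, h5⟩

theorem pvRel_fold (cs : List Char) (b : Int × Int) (d : Char) (h : pvRel b d) :
    pvRel (cs.foldl pvStepA b) (cs.foldl (fun key ch => (pvTransB key).getD ch key) d) := by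
  induction cs generalizing b d with
  | nil => exact h
  | cons c cs ih => exact ih _ _ (pvRel_step b d c h)

theorem pvFold_eq (instructions : List String) (seq : List Int) (acc : List Char)
    (h : seq.map PySem.Int.toStr = acc.map (fun c => String.mk [c])) :
    (instructions.foldl (fun seq item =>
        seq ++ pvDigitA (item.toList.foldl pvStepA ((0 : Int), (0 : Int)))) seq).map PySem.Int.toStr
      = ((instructions.foldl (fun code item =>
        code ++ [item.toList.foldl (fun key ch => (pvTransB key).getD ch key) '5']) acc)).map
          (fun c => String.mk [c]) := by
  induction instructions generalizing seq acc with
  | nil => exact h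
  | cons item rest ih =>
      refine ih _ _ ?_
      have hrel := pvRel_fold item.toList ((0 : Int), (0 : Int)) '5' ⟨by norm_num, by norm_num, by norm_num, by norm_num, by decide⟩
      rw [List.map_append, List.map_append, h,
        pvKey_digit _ hrel.1 hrel.2.1 hrel.2.2.1 hrel.2.2.2.1, hrel.2.2.2.2]; simp

-- ===== VERDICT (by name: the statement is the Claim_ definition above) =====
theorem partOne_spec : Claim_equal_partOne := by
  intro instructions _
  show partOne instructions = partOne_alt instructions
  simp only [partOne, partOne_alt]
  rw [pvFold_eq instructions [] [] (by simp)]
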